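-- pv_equiv track=rewrite | github.com/ekilnams/CodeWars | Python/_7kyu_BaristaProblem/Kata.py | barista
-- ===== SOURCE A (Python) =====
-- def barista(coffees):
--     coffees.sort()
--     wait = 0
--     total = 0
--     for time in coffees:
--         wait += time
--         total += wait
--         wait += 2
--     return total
-- ===== SOURCE B (Python) =====
-- def barista(coffees):
--     coffees.sort()
--     n = len(coffees)
--     return sum((n - i) * t for i, t in enumerate(coffees)) + n * (n - 1)
-- ===== Notes on version B (the rewrite author's own statement) =====
-- stated objective: simpler
-- what changed: Replaced the running wait/total accumulator loop by a closed-form sum: after sorting, element at index i contributes (n-i)*t, and the accumulated +2 steps total n*(n-1).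
import Mathlib
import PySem

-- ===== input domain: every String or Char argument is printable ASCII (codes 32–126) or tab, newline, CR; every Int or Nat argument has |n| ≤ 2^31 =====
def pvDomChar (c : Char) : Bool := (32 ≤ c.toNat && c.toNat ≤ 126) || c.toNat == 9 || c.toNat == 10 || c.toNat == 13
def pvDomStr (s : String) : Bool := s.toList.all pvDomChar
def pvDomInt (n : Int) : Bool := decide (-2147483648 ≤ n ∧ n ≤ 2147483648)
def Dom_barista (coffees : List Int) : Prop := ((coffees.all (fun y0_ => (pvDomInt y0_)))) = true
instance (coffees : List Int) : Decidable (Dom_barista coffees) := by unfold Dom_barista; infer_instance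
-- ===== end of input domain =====

-- B replaces A's running wait/total accumulator loop by a closed-form sum over the sorted list (simpler arithmetic form; same cost).
-- A sorts its argument in place; the equivalence proved here is about the return value (B performs the same in-place sort).


-- ===== PORT A =====
def barista (coffees : List Int) : Int :=
  let s := PySem.List.sorted coffees (fun x => x)
  (s.foldl (fun (st : Int × Int) time =>
      let wait := st.1 + time
      let total := st.2 + wait
      (wait + 2, total)) (0, 0)).2

-- ===== PORT B =====
def barista_alt (coffees : List Int) : Int :=
  let s := PySem.List.sorted coffees (fun x => x)
  let n : Int := s.length
  ((PySem.List.enumerate s).foldl (fun acc p => acc + (n - p.1) * p.2) 0) + n * (n - 1)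

-- ===== PRECONDITION & SPEC =====
def Spec_barista (coffees : List Int) (out : Int) : Prop := out = barista_alt coffees
instance (coffees : List Int) (out : Int) : Decidable (Spec_barista coffees out) := by unfold Spec_barista; infer_instance

-- ===== CLAIM (what is proved, stated in full; the proofs are below) =====
def Claim_equal_barista : Prop := ∀ (coffees : List Int), Dom_barista coffees → Spec_barista coffees (barista coffees)

-- ===== LEMMAS AND PROOFS =====

/-- weighted sum: W d [x0, x1, …] = d*x0 + (d-1)*x1 + … -/
def pvW (d : Int) : List Int → Int
  | [] => 0
  | x :: xs => d * x + pvW (d - 1) xs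

theorem pvW_cons (d x : Int) (xs : List Int) : pvW d (x :: xs) = d * x + pvW (d - 1) xs := rfl

theorem barista_alt_fold (xs : List Int) : ∀ (n k a : Int),
    (PySem.List.enumerate xs k).foldl (fun acc p => acc + (n - p.1) * p.2) a
      = a + pvW (n - k) xs := by
  induction xs with
  | nil => intro n k a; simp [PySem.List.enumerate_nil, pvW]
  | cons x xs ih =>
    intro n k a
    rw [PySem.List.enumerate_cons]
    simp only [List.foldl_cons]
    rw [ih n (k + 1), pvW_cons]
    ring_nf

theorem barista_fold (xs : List Int) : ∀ (w t : Int),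
    (xs.foldl (fun (st : Int × Int) time =>
        let wait := st.1 + time
        let total := st.2 + wait
        (wait + 2, total)) (w, t)).2
      = t + (xs.length : Int) * w + pvW (xs.length : Int) xs
          + (xs.length : Int) * ((xs.length : Int) - 1) := by
  induction xs with
  | nil => intro w t; simp [pvW]
  | cons x xs ih =>
    intro w t
    simp only [List.foldl_cons]
    rw [ih (w + x + 2) (t + (w + x)), pvW_cons]
    push_cast [List.length_cons]
    ring_nf

-- ===== VERDICT (by name: the statement is the Claim_ definition above) =====
theorem barista_spec : Claim_equal_barista := by
  intro coffees _
  unfold Spec_barista barista barista_alt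
  simp only []
  rw [barista_fold, barista_alt_fold]
  ring_nf
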